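-- pv_equiv track=rewrite | github.com/multivac61/aoc | year/2016.py | state_hash
-- ===== SOURCE A (Python) =====
-- def state_hash(state):
--     elevator, floors = state
--     # Create pairs of (generator, chip) positions for each element
--     pairs = {}
--     for floor_num, floor in enumerate(floors):
--         for elem, type_ in floor:
--             if elem not in pairs:
--                 pairs[elem] = [-1, -1]
--             pairs[elem][0 if type_ == "G" else 1] = floor_num
--
--     # Sort pairs to make equivalent states hash the same
--     return (elevator, tuple(sorted(tuple(pos) for pos in pairs.values())))
-- ===== SOURCE B (Python) =====
-- def state_hash(state):
--     elevator, floors = state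
--     # Flatten to (elem, type_, floor_num) records, no dict:
--     flat = [(elem, type_, i) for i, floor in enumerate(floors) for elem, type_ in floor]
--     # Distinct elements in first-appearance order:
--     elems = list(dict.fromkeys(e for e, _, _ in flat))
--     pairs = []
--     for elem in elems:
--         g, c = -1, -1
--         for e, t, i in flat:
--             if e == elem:
--                 if t == "G":
--                     g = i
--                 else:
--                     c = i
--         pairs.append((g, c))
--     return (elevator, tuple(sorted(pairs)))
-- ===== Notes on version B (the rewrite author's own statement) =====
-- stated objective: alternative
-- what changed: Replaces A's single-pass mutated dict of [gen,chip] pairs by a flat (elem,type,floor) record list with an ordered dedup of elements and a per-element rescan fold that recomputes each pair, then sorts.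
import Mathlib
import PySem

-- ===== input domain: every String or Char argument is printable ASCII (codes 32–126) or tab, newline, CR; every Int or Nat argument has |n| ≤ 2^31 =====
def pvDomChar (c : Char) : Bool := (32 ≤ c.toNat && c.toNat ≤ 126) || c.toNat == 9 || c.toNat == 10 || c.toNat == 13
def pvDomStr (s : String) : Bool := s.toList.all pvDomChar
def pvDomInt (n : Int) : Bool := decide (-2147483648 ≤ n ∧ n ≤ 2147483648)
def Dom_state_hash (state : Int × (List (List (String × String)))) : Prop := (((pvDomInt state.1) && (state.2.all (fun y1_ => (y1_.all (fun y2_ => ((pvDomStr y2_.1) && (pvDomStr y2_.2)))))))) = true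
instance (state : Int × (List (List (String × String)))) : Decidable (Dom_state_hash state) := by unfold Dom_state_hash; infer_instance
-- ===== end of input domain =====

-- B replaces A's mutated dict with a flat record list, ordered dedup and per-element rescans (alternative decomposition, not faster).

-- ===== PORT A =====
def state_hash (state : Int × (List (List (String × String)))) : Int × (List (Int × Int)) :=
  let pairs : PySem.Dict String (Int × Int) :=
    (PySem.List.enumerate state.2).foldl (fun pairs fp =>
      fp.2.foldl (fun pairs et =>
        let pairs := if pairs.contains et.1 then pairs else pairs.insert et.1 (-1, -1)
        let cur := pairs.getD et.1 (-1, -1)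
        pairs.insert et.1 (if et.2 == "G" then (fp.1, cur.2) else (cur.1, fp.1))) pairs)
      PySem.Dict.empty
  (state.1, PySem.List.sorted2 pairs.values (·.1) (·.2))

-- ===== PORT B =====
def state_hash_alt (state : Int × (List (List (String × String)))) : Int × (List (Int × Int)) :=
  let flat : List (String × String × Int) :=
    (PySem.List.enumerate state.2).flatMap (fun fp => fp.2.map (fun et => (et.1, et.2, fp.1)))
  let elems := PySem.List.dedup (flat.map (·.1))
  let pairs := elems.map (fun elem =>
    flat.foldl (fun gc r =>
      if r.1 == elem then (if r.2.1 == "G" then (r.2.2, gc.2) else (gc.1, r.2.2)) else gc)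
      ((-1 : Int), (-1 : Int)))
  (state.1, PySem.List.sorted2 pairs (·.1) (·.2))

-- ===== PRECONDITION & SPEC =====
def Spec_state_hash (state : Int × (List (List (String × String)))) (out : Int × (List (Int × Int))) : Prop := out = state_hash_alt state
instance (state : Int × (List (List (String × String)))) (out : Int × (List (Int × Int))) : Decidable (Spec_state_hash state out) := by unfold Spec_state_hash; infer_instance

-- ===== CLAIM (what is proved, stated in full; the proofs are below) =====
def Claim_equal_state_hash : Prop := ∀ (state : Int × (List (List (String × String)))), Dom_state_hash state → Spec_state_hash state (state_hash state)

-- ===== LEMMAS AND PROOFS =====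

-- the in-place pair update A performs for one record (elem, type_, floor_num)
def pvUpd (r : String × String × Int) (gc : Int × Int) : Int × Int :=
  if r.2.1 == "G" then (r.2.2, gc.2) else (gc.1, r.2.2)

-- A's dict step, written as a single insert
def pvStepA (d : PySem.Dict String (Int × Int)) (r : String × String × Int) :
    PySem.Dict String (Int × Int) :=
  d.insert r.1 (pvUpd r (d.getD r.1 (-1, -1)))

-- A's body step (contains-check + insert + lookup + insert) collapses to pvStepA
theorem stepA_eq (d : PySem.Dict String (Int × Int)) (e t : String) (i : Int) :
    (let d' := if d.contains e then d else d.insert e (-1, -1)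
     let cur := d'.getD e (-1, -1)
     d'.insert e (if t == "G" then (i, cur.2) else (cur.1, i))) = pvStepA d (e, t, i) := by
  by_cases h : d.contains e = true
  · simp [h, pvStepA, pvUpd]
  · have hc : d.contains e = false := by simpa using h
    simp [hc, PySem.Dict.insert_insert_self, pvStepA, pvUpd,
      PySem.Dict.getD_of_not_contains d ((-1 : Int), (-1 : Int)) hc]

-- final value of one key after A's loop = fold of pvUpd over that key's records
theorem getD_foldl_stepA (l : List (String × String × Int))
    (d : PySem.Dict String (Int × Int)) (e : String) :
    (l.foldl pvStepA d).getD e (-1, -1)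
      = (l.filter (fun r => r.1 == e)).foldl (fun gc r => pvUpd r gc) (d.getD e (-1, -1)) := by
  induction l generalizing d with
  | nil => rfl
  | cons r l ih =>
    simp only [List.foldl_cons, List.filter_cons]
    by_cases h : r.1 = e
    · subst h
      simp [ih, pvStepA]
    · have hb : (r.1 == e) = false := by simp [h]
      simp only [hb, Bool.false_eq_true, if_false, ih]
      have : (pvStepA d r).getD e (-1, -1) = d.getD e (-1, -1) := by
        simp [pvStepA, PySem.Dict.getD_insert, Ne.symm h]
      rw [this]

-- ===== VERDICT (by name: the statement is the Claim_ definition above) =====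
theorem state_hash_spec : Claim_equal_state_hash := by
  intro state _
  unfold Spec_state_hash state_hash state_hash_alt
  simp only []
  -- name the flat record list
  set flat : List (String × String × Int) :=
    (PySem.List.enumerate state.2).flatMap (fun fp => fp.2.map (fun et => (et.1, et.2, fp.1)))
    with hflat
  -- A's nested loop is the fold of pvStepA over flat
  have hA : (PySem.List.enumerate state.2).foldl (fun pairs fp =>
        fp.2.foldl (fun pairs et =>
          let pairs := if pairs.contains et.1 then pairs else pairs.insert et.1 (-1, -1)
          let cur := pairs.getD et.1 (-1, -1)
          pairs.insert et.1 (if et.2 == "G" then (fp.1, cur.2) else (cur.1, fp.1))) pairs)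
        PySem.Dict.empty
      = flat.foldl pvStepA PySem.Dict.empty := by
    rw [hflat, List.foldl_flatMap]
    refine PySem.List.foldl_congr_mem _ _ _ _ (fun d fp _ => ?_)
    rw [List.foldl_map]
    exact PySem.List.foldl_congr_mem _ _ _ _ (fun d et _ => stepA_eq d et.1 et.2 fp.1)
  rw [hA]
  congr 1
  -- the dict's value list equals B's pairs list
  have hnodup : (flat.foldl pvStepA PySem.Dict.empty).keys.Nodup := by
    have := PySem.Dict.nodup_keys_foldl_insert_key flat (·.1)
      (fun d r => pvUpd r (d.getD r.1 (-1, -1))) PySem.Dict.empty (by simp)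
    simpa [pvStepA] using this
  have hkeys : (flat.foldl pvStepA PySem.Dict.empty).keys = PySem.List.dedup (flat.map (·.1)) := by
    have := PySem.Dict.keys_foldl_insert_key flat (·.1)
      (fun d r => pvUpd r (d.getD r.1 (-1, -1))) PySem.Dict.empty
    simpa [pvStepA, PySem.List.dedup_eq_ofList] using this
  rw [PySem.Dict.values_eq_map_keys _ hnodup (-1, -1), hkeys]
  congr 1
  refine List.map_congr_left (fun e _ => ?_)
  rw [getD_foldl_stepA]
  rw [List.foldl_filter]
  simp [pvUpd]
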